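-- pv_equiv track=rewrite | github.com/pav0412/umapmap | natural_primemap.py | primefactor_set
-- ===== SOURCE A (Python) =====
-- def primefactor_set(num, prime_map_): # returns set of primefactors for given num
--     factors_ = set() # to prevent duplication
--
--     for prime in prime_map_:
--         while not num%prime:
--             # while the num div prime still has a remainder of zero
--             # keep dividing
--             # then move to the next prime in the list
--             num//=prime
--             factors_.add(prime)
--         if num ==1:
--             # num has been completely factored down. there are no more to be found
--             # therefore, break loop
--             break
--         if num in prime_map_:
--             # if num is a prime, it wont satisfy above loops so it will fallback to this one
--             # add it to the set
--             factors_.add(num)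
--
--     return factors_
-- ===== SOURCE B (Python) =====
-- def primefactor_set(num, prime_map_):
--     # The traversal order of prime_map_ is semantically forced (the cofactor state
--     # makes the result order-dependent, e.g. (8,[4,2]) vs (8,[2,4])), so B changes
--     # the per-entry work instead: it removes all factors p from the cofactor in
--     # O(log multiplicity) exact divisions by climbing a ladder of squared powers
--     # p, p^2, p^4, ... and greedily dividing back down (binary multiplicity
--     # extraction), instead of A's one-by-one `while c % p == 0: c //= p`; the
--     # per-entry `num in prime_map_` list scan becomes one lookup in a set built once.
--     members = frozenset(prime_map_)
--     factors_ = set()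
--     c = num
--     for p in prime_map_:
--         if c % p == 0:
--             factors_.add(p)
--             ladder = [p]
--             while c % (ladder[-1] * ladder[-1]) == 0:
--                 ladder.append(ladder[-1] * ladder[-1])
--             for q in reversed(ladder):
--                 if c % q == 0:
--                     c //= q
--         if c == 1:
--             break
--         if c in members:
--             factors_.add(c)
--     return factors_
-- ===== Notes on version B (the rewrite author's own statement) =====
-- stated objective: faster
-- what changed: The traversal order of prime_map_ is forced (the cofactor makes the result order-dependent), so B changes the per-entry algorithm: each entry's full multiplicity is removed by binary extraction over a ladder of squared powers p, p^2, p^4, ... (O(log v) exact divisions instead of A's v one-by-one divisions), and A's per-iteration 'num in prime_map_' list scan becomes one lookup in a set built once (O(n^2) -> O(n) in the list length).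
-- outside the precondition, e.g. on primefactor_set(2, [2, 0]): A returns {2}, B returns {2}; on primefactor_set(2, [2, 1]): A returns {2}, B returns {2}
import Mathlib
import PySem

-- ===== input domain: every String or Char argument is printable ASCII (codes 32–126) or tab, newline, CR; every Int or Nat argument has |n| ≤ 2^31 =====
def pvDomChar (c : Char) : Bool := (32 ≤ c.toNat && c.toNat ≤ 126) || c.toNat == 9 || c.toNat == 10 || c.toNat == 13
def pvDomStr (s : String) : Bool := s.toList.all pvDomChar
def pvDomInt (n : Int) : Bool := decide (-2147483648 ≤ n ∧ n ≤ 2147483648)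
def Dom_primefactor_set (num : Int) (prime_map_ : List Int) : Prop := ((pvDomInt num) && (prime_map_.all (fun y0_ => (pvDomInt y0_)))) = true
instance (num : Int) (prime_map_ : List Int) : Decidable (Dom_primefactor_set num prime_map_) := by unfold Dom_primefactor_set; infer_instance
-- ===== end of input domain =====

-- B keeps the forced left-to-right traversal (the result is order-dependent) but strips each
-- entry's full multiplicity by binary extraction over a ladder of squared powers instead of
-- one-by-one division, and replaces the per-iteration list-membership scan by a set built once.


-- ===== PORT A =====
-- 'while not num % prime: num //= prime; factors_.add(prime)' — fuel makes the loop total;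
-- under Pre_ (num ≠ 0, |prime| ≥ 2) num.natAbs + 1 steps always suffice, so the port is exact there.
def pfWhileA (fuel : Nat) (num prime : Int) (factors : PySem.Set Int) : Int × PySem.Set Int :=
  match fuel with
  | 0 => (num, factors)
  | fuel + 1 =>
    if PySem.Int.mod num prime = 0 then
      pfWhileA fuel (PySem.Int.floordiv num prime) prime (PySem.Set.add factors prime)
    else (num, factors)

def pfLoopA (pm : List Int) (primes : List Int) (num : Int) (factors : PySem.Set Int) : PySem.Set Int :=
  match primes with
  | [] => factors
  | prime :: rest =>
    let r := pfWhileA (num.natAbs + 1) num prime factors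
    if r.1 = 1 then r.2
    else
      let f2 := if pm.contains r.1 then PySem.Set.add r.2 r.1 else r.2
      pfLoopA pm rest r.1 f2

def primefactor_set (num : Int) (prime_map_ : List Int) : List Int :=
  pfLoopA prime_map_ prime_map_ num PySem.Set.empty

-- ===== PORT B =====
-- 'ladder = [p]; while c % (ladder[-1]*ladder[-1]) == 0: ladder.append(...)'. Python appends at the
-- end and then iterates reversed(ladder); here the list is kept head-first (head = highest rung),
-- so building conses and the descent walks the list directly. Fuel: under Pre_ (c ≠ 0) the rung
-- values are divisors of c, so c.natAbs + 1 steps always suffice and the port is exact there.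
def pfLadderB (fuel : Nat) (c : Int) (ladder : List Int) : List Int :=
  match fuel with
  | 0 => ladder
  | fuel + 1 =>
    match ladder with
    | [] => []
    | top :: _ =>
      if PySem.Int.mod c (top * top) = 0 then pfLadderB fuel c ((top * top) :: ladder)
      else ladder

-- 'for q in reversed(ladder): if c % q == 0: c //= q'
def pfDescendB (ladder : List Int) (c : Int) : Int :=
  match ladder with
  | [] => c
  | q :: rest => pfDescendB rest (if PySem.Int.mod c q = 0 then PySem.Int.floordiv c q else c)

def pfLoopB (members : PySem.Set Int) (primes : List Int) (c : Int) (factors : PySem.Set Int) : PySem.Set Int :=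
  match primes with
  | [] => factors
  | p :: rest =>
    let st :=
      if PySem.Int.mod c p = 0 then
        (pfDescendB (pfLadderB (c.natAbs + 1) c [p]) c, PySem.Set.add factors p)
      else (c, factors)
    if st.1 = 1 then st.2
    else pfLoopB members rest st.1 (if members.contains st.1 then PySem.Set.add st.2 st.1 else st.2)

def primefactor_set_alt (num : Int) (prime_map_ : List Int) : List Int :=
  pfLoopB (PySem.Set.ofList prime_map_) prime_map_ num PySem.Set.empty

-- ===== PRECONDITION & SPEC =====
-- Pre_ excludes num = 0 with a nonempty list and any list containing 0, 1 or -1: on such inputs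
-- A raises ZeroDivisionError or loops forever, except when such an entry comes after num is
-- already fully factored (then A returns; whether it is reached is not a closed-form condition).
def Pre_primefactor_set (num : Int) (prime_map_ : List Int) : Prop :=
  (num ≠ 0 ∨ prime_map_ = []) ∧ ∀ p ∈ prime_map_, 2 ≤ p.natAbs
instance (num : Int) (prime_map_ : List Int) : Decidable (Pre_primefactor_set num prime_map_) := by unfold Pre_primefactor_set; infer_instance

def pvWitness_primefactor_set : Int × List Int := (84, [2, 3, 5, 7])

def Spec_primefactor_set (num : Int) (prime_map_ : List Int) (out : List Int) : Prop := out = primefactor_set_alt num prime_map_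
instance (num : Int) (prime_map_ : List Int) (out : List Int) : Decidable (Spec_primefactor_set num prime_map_ out) := by unfold Spec_primefactor_set; infer_instance

-- ===== CLAIM (what is proved, stated in full; the proofs are below) =====
def Claim_equal_primefactor_set : Prop := ∀ (num : Int) (prime_map_ : List Int), Dom_primefactor_set num prime_map_ → Pre_primefactor_set num prime_map_ → Spec_primefactor_set num prime_map_ (primefactor_set num prime_map_)

-- ===== LEMMAS AND PROOFS =====

-- proof-side helper: A's while-loop as a function of the number alone (no set state)
def pfStripB (fuel : Nat) (m p : Int) : Int :=
  match fuel with
  | 0 => m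
  | fuel + 1 =>
    if PySem.Int.mod m p = 0 then pfStripB fuel (PySem.Int.floordiv m p) p else m

-- A's while-loop runs the plain strip on the number and adds the prime exactly when it divided once.
theorem pfWhileA_eq (fuel : Nat) (num prime : Int) (f : PySem.Set Int) :
    pfWhileA (fuel + 1) num prime f =
      (pfStripB (fuel + 1) num prime,
       if PySem.Int.mod num prime = 0 then PySem.Set.add f prime else f) := by
  induction fuel generalizing num f with
  | zero =>
    by_cases h : PySem.Int.mod num prime = 0 <;>
      simp [pfWhileA, pfStripB, h]
  | succ k ih =>
    have e1 : pfWhileA (k + 1 + 1) num prime f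
        = if PySem.Int.mod num prime = 0 then
            pfWhileA (k + 1) (PySem.Int.floordiv num prime) prime (PySem.Set.add f prime)
          else (num, f) := rfl
    have e2 : pfStripB (k + 1 + 1) num prime
        = if PySem.Int.mod num prime = 0 then
            pfStripB (k + 1) (PySem.Int.floordiv num prime) prime
          else num := rfl
    by_cases h : PySem.Int.mod num prime = 0
    · have hmem : prime ∈ PySem.Set.add f prime := by
        rw [PySem.Set.mem_add]; right; rfl
      rw [e1, if_pos h, ih, e2, if_pos h, PySem.Set.add_of_mem hmem, ite_self, if_pos h]
    · rw [e1, if_neg h, e2, if_neg h, if_neg h]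

-- exact division of a nonzero number by a divisor of absolute value ≥ 2 is nonzero and smaller.
theorem floordiv_shrink (m p : Int) (hm : m ≠ 0) (hp : 2 ≤ p.natAbs)
    (hd : PySem.Int.mod m p = 0) :
    PySem.Int.floordiv m p ≠ 0 ∧ (PySem.Int.floordiv m p).natAbs < m.natAbs := by
  have hmul : PySem.Int.floordiv m p * p + PySem.Int.mod m p = m :=
    PySem.Int.floordiv_mul_add_mod m p
  rw [hd, add_zero] at hmul
  set q := PySem.Int.floordiv m p with hq
  have hq0 : q ≠ 0 := by
    intro h0
    rw [h0, zero_mul] at hmul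
    exact hm hmul.symm
  have habs : q.natAbs * p.natAbs = m.natAbs := by
    rw [← Int.natAbs_mul, hmul]
  have hq1 : 1 ≤ q.natAbs := Int.natAbs_pos.mpr hq0
  exact ⟨hq0, by nlinarith⟩

-- exact-division identity, used to rebuild m from its quotient.
theorem floordiv_exact (m p : Int) (hd : PySem.Int.mod m p = 0) :
    PySem.Int.floordiv m p * p = m := by
  have hmul : PySem.Int.floordiv m p * p + PySem.Int.mod m p = m :=
    PySem.Int.floordiv_mul_add_mod m p
  rw [hd, add_zero] at hmul
  exact hmul

-- the naive strip: m = r * p^k with p no longer dividing r.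
theorem pfStripB_char (fuel : Nat) (m p : Int) (hm : m ≠ 0) (hp : 2 ≤ p.natAbs)
    (hfuel : m.natAbs < fuel) :
    ∃ k : Nat, m = pfStripB fuel m p * p ^ k ∧ ¬ p ∣ pfStripB fuel m p ∧ pfStripB fuel m p ≠ 0 := by
  induction fuel generalizing m with
  | zero => omega
  | succ f ih =>
    by_cases h : PySem.Int.mod m p = 0
    · obtain ⟨h0, hlt⟩ := floordiv_shrink m p hm hp h
      obtain ⟨k, hk, hnd, hnz⟩ := ih (PySem.Int.floordiv m p) h0 (by omega)
      refine ⟨k + 1, ?_, ?_, ?_⟩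
      · have := floordiv_exact m p h
        rw [pfStripB, if_pos h]
        calc m = PySem.Int.floordiv m p * p := this.symm
        _ = (pfStripB f (PySem.Int.floordiv m p) p * p ^ k) * p := by rw [← hk]
        _ = pfStripB f (PySem.Int.floordiv m p) p * p ^ (k + 1) := by ring
      · rw [pfStripB, if_pos h]; exact hnd
      · rw [pfStripB, if_pos h]; exact hnz
    · refine ⟨0, by simp [pfStripB, h], ?_, by simpa [pfStripB, h] using hm⟩
      rw [pfStripB, if_neg h]
      intro hdvd
      exact h ((PySem.Int.mod_eq_zero_iff_dvd m p).mpr hdvd)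

-- the ladder the Python while-loop builds: exponents 2^k, 2^(k-1), …, 2, 1, head first.
def downLadder (p : Int) : Nat → List Int
  | 0 => [p]
  | k + 1 => p ^ (2 ^ (k + 1)) :: downLadder p k

theorem downLadder_head (p : Int) (k : Nat) :
    ∃ t, downLadder p k = p ^ (2 ^ k) :: t := by
  cases k with
  | zero => exact ⟨[], by simp [downLadder]⟩
  | succ k => exact ⟨downLadder p k, rfl⟩

-- a power of p dividing a nonzero m has a small exponent.
theorem pow_dvd_exp_lt (m p : Int) (e : Nat) (hm : m ≠ 0) (hp : 2 ≤ p.natAbs)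
    (hd : p ^ e ∣ m) : e < m.natAbs := by
  have h1 : (p ^ e).natAbs ∣ m.natAbs := Int.natAbs_dvd_natAbs.mpr hd
  have h2 : p.natAbs ^ e ≤ m.natAbs := by
    rw [Int.natAbs_pow] at h1
    exact Nat.le_of_dvd (Int.natAbs_pos.mpr hm) h1
  have h3 : 2 ^ e ≤ p.natAbs ^ e := Nat.pow_le_pow_left hp e
  have h4 : e < 2 ^ e := Nat.lt_two_pow_self
  omega

-- the build loop turns downLadder p k into downLadder p K with p^(2^(K+1)) no longer dividing c.
theorem pfLadderB_char (fuel : Nat) (c p : Int) (hc : c ≠ 0) (hp : 2 ≤ p.natAbs) :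
    ∀ k : Nat, c.natAbs ≤ fuel + k →
      ∃ K : Nat, pfLadderB fuel c (downLadder p k) = downLadder p K ∧ ¬ p ^ (2 ^ (K + 1)) ∣ c := by
  induction fuel with
  | zero =>
    intro k hk
    refine ⟨k, rfl, fun hdvd => ?_⟩
    have h1 := pow_dvd_exp_lt c p (2 ^ (k + 1)) hc hp hdvd
    have h2 : k < 2 ^ k := Nat.lt_two_pow_self
    have h3 : 2 ^ k < 2 ^ (k + 1) := Nat.pow_lt_pow_right (by omega) (by omega)
    omega
  | succ f ih =>
    intro k hk
    obtain ⟨t, ht⟩ := downLadder_head p k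
    rw [ht]
    have hsq : p ^ (2 ^ k) * p ^ (2 ^ k) = p ^ (2 ^ (k + 1)) := by
      rw [← pow_add]; congr 1; omega
    by_cases h : PySem.Int.mod c (p ^ (2 ^ k) * p ^ (2 ^ k)) = 0
    · have step : pfLadderB (f + 1) c (p ^ (2 ^ k) :: t)
          = pfLadderB f c ((p ^ (2 ^ k) * p ^ (2 ^ k)) :: p ^ (2 ^ k) :: t) := by
        rw [pfLadderB, if_pos h]
      rw [step, hsq]
      have hnext : (p ^ (2 ^ (k + 1)) :: p ^ (2 ^ k) :: t) = downLadder p (k + 1) := by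
        rw [downLadder, ← ht]
      rw [hnext]
      exact ih (k + 1) (by omega)
    · refine ⟨k, ?_, ?_⟩
      · rw [pfLadderB, if_neg h, ht]
      · intro hdvd
        rw [← hsq] at hdvd
        exact h ((PySem.Int.mod_eq_zero_iff_dvd _ _).mpr hdvd)

-- the descent removes every factor p once the top bound holds: c = r * p^m with p not dividing r.
theorem pfDescendB_char (p : Int) (hp : 2 ≤ p.natAbs) :
    ∀ (K : Nat) (c : Int), c ≠ 0 → ¬ p ^ (2 ^ (K + 1)) ∣ c →
      ∃ m : Nat, c = pfDescendB (downLadder p K) c * p ^ m ∧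
        ¬ p ∣ pfDescendB (downLadder p K) c ∧ pfDescendB (downLadder p K) c ≠ 0 := by
  intro K
  induction K with
  | zero =>
    intro c hc hbound
    by_cases h : PySem.Int.mod c p = 0
    · have hr : pfDescendB (downLadder p 0) c = PySem.Int.floordiv c p := by
        simp [downLadder, pfDescendB, h]
      obtain ⟨h0, _⟩ := floordiv_shrink c p hc hp h
      refine ⟨1, ?_, ?_, by rw [hr]; exact h0⟩
      · rw [hr, pow_one]; exact (floordiv_exact c p h).symm
      · rw [hr]
        intro hdvd
        obtain ⟨q, hq⟩ := hdvd
        apply hbound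
        have : c = q * p * p := by
          have := floordiv_exact c p h
          rw [hq] at this; linarith [this]
        refine ⟨q, ?_⟩
        have h21 : (2 : Nat) ^ (0 + 1) = 2 := by norm_num
        rw [h21, this]; ring
    · have hr : pfDescendB (downLadder p 0) c = c := by
        simp [downLadder, pfDescendB, h]
      refine ⟨0, by rw [hr]; ring, ?_, by rw [hr]; exact hc⟩
      rw [hr]
      intro hdvd
      exact h ((PySem.Int.mod_eq_zero_iff_dvd c p).mpr hdvd)
  | succ K ih =>
    intro c hc hbound
    have hstep : pfDescendB (downLadder p (K + 1)) c
        = pfDescendB (downLadder p K)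
            (if PySem.Int.mod c (p ^ (2 ^ (K + 1))) = 0 then
              PySem.Int.floordiv c (p ^ (2 ^ (K + 1))) else c) := rfl
    by_cases h : PySem.Int.mod c (p ^ (2 ^ (K + 1))) = 0
    · set c' := PySem.Int.floordiv c (p ^ (2 ^ (K + 1))) with hc'
      have hppow : 2 ≤ (p ^ (2 ^ (K + 1))).natAbs := by
        rw [Int.natAbs_pow]
        calc 2 = 2 ^ 1 := by norm_num
        _ ≤ 2 ^ (2 ^ (K + 1)) := Nat.pow_le_pow_right (by omega) Nat.one_le_two_pow
        _ ≤ p.natAbs ^ (2 ^ (K + 1)) := Nat.pow_le_pow_left hp _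
      obtain ⟨h0, _⟩ := floordiv_shrink c (p ^ (2 ^ (K + 1))) hc hppow h
      have hexact : c' * p ^ (2 ^ (K + 1)) = c := floordiv_exact c (p ^ (2 ^ (K + 1))) h
      have hbound' : ¬ p ^ (2 ^ (K + 1)) ∣ c' := by
        intro hdvd
        obtain ⟨q, hq⟩ := hdvd
        apply hbound
        refine ⟨q, ?_⟩
        have : (2 : Nat) ^ (K + 1 + 1) = 2 ^ (K + 1) + 2 ^ (K + 1) := by ring
        rw [this, pow_add, ← hexact, hq]; ring
      obtain ⟨m, hm, hnd, hnz⟩ := ih c' h0 hbound'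
      rw [hstep, if_pos h]
      exact ⟨m + 2 ^ (K + 1), by rw [pow_add, ← mul_assoc, ← hm]; exact hexact.symm, hnd, hnz⟩
    · have hbound' : ¬ p ^ (2 ^ (K + 1)) ∣ c := by
        intro hdvd
        exact h ((PySem.Int.mod_eq_zero_iff_dvd _ _).mpr hdvd)
      obtain ⟨m, hm, hnd, hnz⟩ := ih c hc hbound'
      rw [hstep, if_neg h]
      exact ⟨m, hm, hnd, hnz⟩

-- uniqueness: the p-free part of a nonzero integer is unique.
theorem pfree_unique (p r1 r2 : Int) (m1 m2 : Nat) (hp : 2 ≤ p.natAbs)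
    (heq : r1 * p ^ m1 = r2 * p ^ m2) (h1 : ¬ p ∣ r1) (h2 : ¬ p ∣ r2) : r1 = r2 := by
  have hpne : p ≠ 0 := by
    intro h; rw [h] at hp; simp at hp
  rcases le_total m1 m2 with hle | hle
  · have : r1 * p ^ m1 = (r2 * p ^ (m2 - m1)) * p ^ m1 := by
      rw [heq, mul_assoc, ← pow_add]
      congr 2
      omega
    have hr : r1 = r2 * p ^ (m2 - m1) := by
      have hpm : (p : Int) ^ m1 ≠ 0 := pow_ne_zero _ hpne
      exact mul_right_cancel₀ hpm this
    rcases Nat.eq_zero_or_pos (m2 - m1) with hd | hd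
    · rw [hr, hd, pow_zero, mul_one]
    · exfalso
      apply h1
      rw [hr]
      exact Dvd.dvd.mul_left (dvd_pow_self p (by omega)) r2
  · have : (r1 * p ^ (m1 - m2)) * p ^ m2 = r2 * p ^ m2 := by
      rw [← heq, mul_assoc, ← pow_add]
      congr 2
      omega
    have hr : r2 = r1 * p ^ (m1 - m2) := by
      have hpm : (p : Int) ^ m2 ≠ 0 := pow_ne_zero _ hpne
      exact (mul_right_cancel₀ hpm this).symm
    rcases Nat.eq_zero_or_pos (m1 - m2) with hd | hd
    · rw [hr, hd, pow_zero, mul_one]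
    · exfalso
      apply h2
      rw [hr]
      exact Dvd.dvd.mul_left (dvd_pow_self p (by omega)) r1
-- the crux: B's ladder strip equals A's one-by-one strip.
theorem ladder_eq_strip (c p : Int) (hc : c ≠ 0) (hp : 2 ≤ p.natAbs) :
    pfDescendB (pfLadderB (c.natAbs + 1) c [p]) c = pfStripB (c.natAbs + 1) c p := by
  have hinit : ([p] : List Int) = downLadder p 0 := rfl
  obtain ⟨K, hK, hbound⟩ := pfLadderB_char (c.natAbs + 1) c p hc hp 0 (by omega)
  rw [hinit, hK]
  obtain ⟨m1, hm1, hnd1, _⟩ := pfDescendB_char p hp K c hc hbound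
  obtain ⟨m2, hm2, hnd2, _⟩ := pfStripB_char (c.natAbs + 1) c p hc hp (by omega)
  exact pfree_unique p _ _ m1 m2 hp (by rw [← hm1, ← hm2]) hnd1 hnd2

-- B strips to the same value A does, and that value is nonzero.
theorem strip_ne_zero (c p : Int) (hc : c ≠ 0) (hp : 2 ≤ p.natAbs) :
    pfStripB (c.natAbs + 1) c p ≠ 0 :=
  (pfStripB_char (c.natAbs + 1) c p hc hp (by omega)).choose_spec.2.2

-- main loop correspondence.
theorem loopA_eq_loopB (pm : List Int) (primes : List Int) (c : Int) (f : PySem.Set Int)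
    (hc : c ≠ 0) (hp : ∀ p ∈ primes, 2 ≤ p.natAbs) :
    pfLoopA pm primes c f = pfLoopB (PySem.Set.ofList pm) primes c f := by
  induction primes generalizing c f with
  | nil => simp [pfLoopA, pfLoopB]
  | cons p rest ih =>
    have hp2 : 2 ≤ p.natAbs := hp p (List.mem_cons_self ..)
    have hrest : ∀ q ∈ rest, 2 ≤ q.natAbs := fun q hq => hp q (List.mem_cons_of_mem _ hq)
    have hwhile := pfWhileA_eq c.natAbs c p f
    set s := pfStripB (c.natAbs + 1) c p with hs
    have hsne : s ≠ 0 := strip_ne_zero c p hc hp2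
    have hB : (if PySem.Int.mod c p = 0 then
        (pfDescendB (pfLadderB (c.natAbs + 1) c [p]) c, PySem.Set.add f p)
      else (c, f)) = (s, if PySem.Int.mod c p = 0 then PySem.Set.add f p else f) := by
      by_cases h : PySem.Int.mod c p = 0
      · rw [if_pos h, if_pos h, ladder_eq_strip c p hc hp2]
      · rw [if_neg h, if_neg h, hs, pfStripB, if_neg h]
    have hcont : (PySem.Set.ofList pm).contains s = pm.contains s := by
      by_cases h : s ∈ pm
      · simp [PySem.Set.contains_eq_listContains, h, (PySem.Set.mem_ofList pm s).mpr h]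
      · have h2 : s ∉ PySem.Set.ofList pm := fun hx => h ((PySem.Set.mem_ofList pm s).mp hx)
        simp [PySem.Set.contains_eq_listContains, h, h2]
    have hA : pfLoopA pm (p :: rest) c f
        = (if s = 1 then (if PySem.Int.mod c p = 0 then PySem.Set.add f p else f)
           else pfLoopA pm rest s
             (if pm.contains s then
                PySem.Set.add (if PySem.Int.mod c p = 0 then PySem.Set.add f p else f) s
              else (if PySem.Int.mod c p = 0 then PySem.Set.add f p else f))) := by
      rw [pfLoopA, hwhile]
    have hBloop : pfLoopB (PySem.Set.ofList pm) (p :: rest) c f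
        = (if s = 1 then (if PySem.Int.mod c p = 0 then PySem.Set.add f p else f)
           else pfLoopB (PySem.Set.ofList pm) rest s
             (if (PySem.Set.ofList pm).contains s then
                PySem.Set.add (if PySem.Int.mod c p = 0 then PySem.Set.add f p else f) s
              else (if PySem.Int.mod c p = 0 then PySem.Set.add f p else f))) := by
      rw [pfLoopB, hB]
    rw [hA, hBloop, hcont]
    by_cases h1 : s = 1
    · rw [if_pos h1, if_pos h1]
    · rw [if_neg h1, if_neg h1, ih s _ hsne hrest]

-- ===== VERDICT (by name: the statement is the Claim_ definition above) =====
theorem primefactor_set_spec : Claim_equal_primefactor_set := by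
  intro num pm _ hpre
  obtain ⟨hnum, hall⟩ := hpre
  unfold Spec_primefactor_set primefactor_set primefactor_set_alt
  rcases hnum with hnum | rfl
  · exact loopA_eq_loopB pm pm num PySem.Set.empty hnum hall
  · simp [pfLoopA, pfLoopB]
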